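-- pv_equiv track=rewrite | github.com/kimdevspace/study-algorithm | 프로그래머스/0/181836. 그림 확대/그림 확대.py | solution
-- ===== SOURCE A (Python) =====
-- def solution(picture, k):
--     answer = []
--     for i in picture: #picture 조사
--         char='' #picture 조사할 때마다 문자열 생성
--         for j in i: # 문자열 원소의 문자 조사 (가로)
--             char+=j*k #빈 문자열에 문자xk 값 곱해서 저장.
--         for c in range(k): # k의 길이만큼  (세로)
--             answer.append(char) #세로로 answer에 추가.
--     return answer
-- ===== SOURCE B (Python) =====
-- def solution(picture, k):
--     # index-gather: each expanded row is gathered from its source row as row[j // k];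
--     # the output is gathered from the expanded rows as rows[t // k]
--     rows = [''.join(row[j // k] for j in range(len(row) * k)) for row in picture]
--     return [rows[t // k] for t in range(len(picture) * k)]
-- ===== Notes on version B (the rewrite author's own statement) =====
-- stated objective: alternative
-- what changed: A builds the output by scatter/replication (concatenating j*k per character and appending the finished row k times); B is an index-gather: it computes every expanded row character directly from the source as row[j//k] over the output row's coordinate range, and every output row as rows[t//k] over the output's row range, with no repetition or replication primitive.
import Mathlib
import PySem

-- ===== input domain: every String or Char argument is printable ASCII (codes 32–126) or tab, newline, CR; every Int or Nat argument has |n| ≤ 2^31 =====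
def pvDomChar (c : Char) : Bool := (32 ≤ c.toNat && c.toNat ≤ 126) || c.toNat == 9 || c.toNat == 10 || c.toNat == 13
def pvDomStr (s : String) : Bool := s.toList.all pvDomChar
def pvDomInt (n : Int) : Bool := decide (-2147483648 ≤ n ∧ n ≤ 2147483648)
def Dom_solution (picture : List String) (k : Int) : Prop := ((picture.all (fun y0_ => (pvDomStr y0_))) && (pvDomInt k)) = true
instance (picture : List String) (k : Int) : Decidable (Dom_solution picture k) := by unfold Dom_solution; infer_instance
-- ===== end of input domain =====

-- B replaces A's scatter/replication loop (concatenate j*k per char, append the row k times) by an index-gather: expanded-row chars are read as row[j//k], output rows as rows[t//k]; same output, same cost.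


-- ===== PORT A =====
-- literal port of A: one interleaved loop, string concatenation, k appends per row
def solution (picture : List String) (k : Int) : List String :=
  picture.foldl (fun answer i =>
    let char := i.toList.foldl (fun s j => s ++ String.ofList (List.replicate k.toNat j)) ""
    (List.range k.toNat).foldl (fun ans _ => ans ++ [char]) answer) []

-- ===== PORT B =====
-- literal port of B: gather every expanded-row character as row[j//k], then every output row as rows[t//k]
-- (the pyGetD defaults are never used: 0 ≤ j < len(row)*k, 0 ≤ t < len(picture)*k and k > 0 force the indices in range)
def solution_alt (picture : List String) (k : Int) : List String :=
  let rows := picture.map (fun row =>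
    String.ofList ((PySem.List.pyRange 0 (PySem.Str.len row * k) 1).map (fun j =>
      PySem.List.pyGetD row.toList (PySem.Int.floordiv j k) ' ')))
  (PySem.List.pyRange 0 ((picture.length : Int) * k) 1).map (fun t =>
    PySem.List.pyGetD rows (PySem.Int.floordiv t k) "")

-- ===== PRECONDITION & SPEC =====
def Spec_solution (picture : List String) (k : Int) (out : List String) : Prop := out = solution_alt picture k
instance (picture : List String) (k : Int) (out : List String) : Decidable (Spec_solution picture k out) := by unfold Spec_solution; infer_instance

-- ===== CLAIM (what is proved, stated in full; the proofs are below) =====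
def Claim_equal_solution : Prop := ∀ (picture : List String) (k : Int), Dom_solution picture k → Spec_solution picture k (solution picture k)

-- ===== LEMMAS AND PROOFS =====

theorem foldl_str (t : List String) : ∀ (a b : String),
    List.foldl (fun r s => r ++ s) (a ++ b) t = a ++ List.foldl (fun r s => r ++ s) b t := by
  induction t with
  | nil => intro a b; rfl
  | cons c u ih => intro a b; simp only [List.foldl_cons, String.append_assoc, ih]

-- per-row: A's char-level foldl equals join of per-char repeats
theorem row_eq (n : Nat) (l : List Char) (s : String) :
    l.foldl (fun s j => s ++ String.ofList (List.replicate n j)) s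
      = s ++ String.join (l.map (fun c => String.ofList (List.replicate n c))) := by
  induction l generalizing s with
  | nil => simp [String.join]
  | cons c t ih =>
      simp only [List.foldl_cons, List.map_cons]
      rw [ih]
      simp only [String.join, List.foldl_cons]
      rw [show ("" ++ String.ofList (List.replicate n c))
            = String.ofList (List.replicate n c) ++ "" from by simp]
      rw [foldl_str, String.append_assoc]

theorem range_foldl_append (n : Nat) (x : String) (acc : List String) :
    (List.range n).foldl (fun ans _ => ans ++ [x]) acc
      = acc ++ (List.range n).map (fun _ => x) := by
  induction n generalizing acc with
  | zero => simp
  | succ m ih => simp [List.range_succ, List.foldl_append, ih]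

-- A in closed form: horizontally expanded rows, each repeated k times
theorem a_eq (picture : List String) (k : Int) (acc : List String) :
    picture.foldl (fun answer i =>
      let char := i.toList.foldl (fun s j => s ++ String.ofList (List.replicate k.toNat j)) ""
      (List.range k.toNat).foldl (fun ans _ => ans ++ [char]) answer) acc
    = acc ++ (picture.map (fun row =>
        String.join (row.toList.map (fun c => String.ofList (List.replicate k.toNat c))))).flatMap
          (fun r => (List.range k.toNat).map (fun _ => r)) := by
  induction picture generalizing acc with
  | nil => simp
  | cons p t ih =>
      simp only [List.foldl_cons, List.map_cons, List.flatMap_cons]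
      rw [ih, range_foldl_append, row_eq]
      simp [List.append_assoc]

-- join of ofList-strings is ofList of the flattened char lists
theorem join_ofList (ls : List (List Char)) :
    String.join (ls.map String.ofList) = String.ofList ls.flatten := by
  induction ls with
  | nil => rfl
  | cons a t ih =>
    simp only [String.join, List.map_cons, List.foldl_cons, List.flatten_cons] at *
    rw [show ("" ++ String.ofList a) = String.ofList a ++ "" from by simp]
    rw [foldl_str, ih]
    apply String.toList_inj.mp; simp

-- reading index i at getD over the full range reproduces the list
theorem map_getD_range {α : Type} (xs : List α) (d : α) :
    (List.range xs.length).map (fun i => xs.getD i d) = xs := by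
  apply List.ext_getElem
  · simp
  · intro i h1 h2
    simp [List.getD]; rw [List.getElem?_eq_getElem]
    · simp
    · exact h2

-- the gather step: t ↦ f (t / K) over range (n*K) lists each f i exactly K times, in order
theorem gather {α : Type} (K : Nat) (hK : 0 < K) (f : Nat → α) (n : Nat) :
    (List.range (n * K)).map (fun t => f (t / K))
      = (List.range n).flatMap (fun i => List.replicate K (f i)) := by
  induction n with
  | zero => simp
  | succ m ih =>
    rw [Nat.succ_mul, List.range_add, List.map_append, ih, List.range_succ,
        List.flatMap_append]
    congr 1
    simp only [List.flatMap_cons, List.flatMap_nil, List.append_nil, List.map_map]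
    rw [show ((fun t => f (t / K)) ∘ (fun i => m * K + i))
          = (fun i : Nat => f ((i + m * K) / K)) from by funext i; simp [Nat.add_comm]]
    rw [List.map_congr_left (fun a ha => by
      rw [Nat.add_mul_div_right _ _ hK, Nat.div_eq_of_lt (List.mem_range.mp ha), Nat.zero_add] :
      ∀ a ∈ List.range K, f ((a + m * K) / K) = (fun _ : Nat => f m) a)]
    rw [List.map_const', List.length_range]

-- a pyRange from 0 to a product of casts is the mapped Nat range
theorem pyRange_cast (h k : Nat) :
    PySem.List.pyRange 0 ((h : Int) * (k : Int)) 1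
      = (List.range (h * k)).map (fun i => ((i : Nat) : Int)) := by
  rw [PySem.List.pyRange_one]
  have : ((h : Int) * (k : Int) - 0).toNat = h * k := by
    rw [Int.sub_zero, ← Int.natCast_mul, Int.toNat_natCast]
  rw [this]; simp only [zero_add]

-- B's inner string equals A's horizontal expansion of the same row
theorem inner_eq (r : String) (K : Nat) (hK : 0 < K) :
    String.ofList ((PySem.List.pyRange 0 (PySem.Str.len r * (K : Int)) 1).map (fun j =>
        PySem.List.pyGetD r.toList (PySem.Int.floordiv j (K : Int)) ' '))
      = String.join (r.toList.map (fun c => String.ofList (List.replicate K c))) := by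
  rw [PySem.Str.len_eq, pyRange_cast, List.map_map]
  have : ((fun j => PySem.List.pyGetD r.toList (PySem.Int.floordiv j (K : Int)) ' ')
            ∘ (fun i : Nat => ((i : Nat) : Int)))
      = (fun t : Nat => r.toList.getD (t / K) ' ') := by
    funext i
    show PySem.List.pyGetD r.toList (PySem.Int.floordiv (i : Int) (K : Int)) ' ' = _
    rw [PySem.Int.floordiv_natCast, PySem.List.pyGetD_natCast]
  rw [this, gather K hK (fun i => r.toList.getD i ' ') r.toList.length]
  rw [show (r.toList.map (fun c => String.ofList (List.replicate K c)))
        = (r.toList.map (fun c => List.replicate K c)).map String.ofList from by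
      rw [List.map_map]; rfl]
  rw [join_ofList]
  congr 1
  conv_rhs => rw [← map_getD_range r.toList ' ']
  rw [← List.flatMap_def, List.flatMap_map]

-- ===== VERDICT (by name: the statement is the Claim_ definition above) =====
theorem solution_spec : Claim_equal_solution := by
  intro picture k _
  unfold Spec_solution solution solution_alt
  rw [a_eq, List.nil_append]
  by_cases hk : k ≤ 0
  · -- k ≤ 0: both sides are empty
    have h0 : k.toNat = 0 := Int.toNat_of_nonpos hk
    have hb : (picture.length : Int) * k ≤ 0 :=
      mul_nonpos_of_nonneg_of_nonpos (Int.natCast_nonneg _) hk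
    show _ = (PySem.List.pyRange 0 ((picture.length : Int) * k) 1).map _
    rw [PySem.List.pyRange_one_eq_nil hb]
    simp [h0]
  · rw [not_le] at hk
    have hK : 0 < k.toNat := by omega
    have hkK : k = (k.toNat : Int) := (Int.toNat_of_nonneg (le_of_lt hk)).symm
    rw [hkK]
    simp only [Int.toNat_natCast]
    -- zeta-reduce B's `let rows := …` (definitional)
    show _ = (PySem.List.pyRange 0 ((picture.length : Int) * ((k.toNat : Nat) : Int)) 1).map (fun t =>
      PySem.List.pyGetD (picture.map (fun row =>
        String.ofList ((PySem.List.pyRange 0 (PySem.Str.len row * ((k.toNat : Nat) : Int)) 1).map (fun j =>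
          PySem.List.pyGetD row.toList (PySem.Int.floordiv j ((k.toNat : Nat) : Int)) ' '))))
        (PySem.Int.floordiv t ((k.toNat : Nat) : Int)) "")
    -- B's inner pass is A's horizontal expansion of each row
    rw [show (fun row => String.ofList ((PySem.List.pyRange 0 (PySem.Str.len row * ((k.toNat : Nat) : Int)) 1).map (fun j =>
          PySem.List.pyGetD row.toList (PySem.Int.floordiv j ((k.toNat : Nat) : Int)) ' ')))
        = (fun row => String.join (row.toList.map (fun c => String.ofList (List.replicate k.toNat c))))
      from funext (fun r => inner_eq r k.toNat hK)]
    rw [pyRange_cast, List.map_map]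
    have hbody : ((fun t =>
          PySem.List.pyGetD (picture.map (fun row =>
            String.join (row.toList.map (fun c => String.ofList (List.replicate k.toNat c)))))
            (PySem.Int.floordiv t (k.toNat : Int)) "")
            ∘ (fun i : Nat => ((i : Nat) : Int)))
        = (fun t : Nat => String.join ((picture.getD (t / k.toNat) "").toList.map
            (fun c => String.ofList (List.replicate k.toNat c)))) := by
      funext i
      show PySem.List.pyGetD _ (PySem.Int.floordiv (i : Int) (k.toNat : Int)) "" = _
      rw [PySem.Int.floordiv_natCast, PySem.List.pyGetD_natCast]
      -- getD through the map (the default "" expands to itself: join of [] is "")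
      simp only [List.getD, List.getElem?_map]
      cases picture[i / k.toNat]? <;> rfl
    rw [hbody, gather k.toNat hK
          (fun i => String.join ((picture.getD i "").toList.map
            (fun c => String.ofList (List.replicate k.toNat c)))) picture.length]
    conv_lhs => rw [← map_getD_range picture ""]
    rw [List.map_map, List.flatMap_map]
    congr 1
    funext i
    rw [List.map_const', List.length_range]
    rfl
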